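-- pv_equiv track=rewrite | github.com/nizar-nz/PythonCoding | Jeu1.py | Chance
-- ===== SOURCE A (Python) =====
-- def Chance(ch):
--     if not (ch.isdigit() and len(ch)==8 and ch[0] in ["2","4",'5','9']):
--         msg="Vérifier le numéro de télephone!"
--     else:
--         msg="Désolé vous n'avez pas gagné."
--         s=0
--         for i in range (len(ch)) :
--             s+=int(ch[i])*i
--         if premier(s):
--             msg="Félicitations, vous avez gagné."
--     return msg
--
-- def premier(n):
--     d=2
--     while d<n and n%d !=0:
--         d+=1
--     return n == d
-- ===== SOURCE B (Python) =====
-- def _sieve(limit):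
--     is_p = [True] * (limit + 1)
--     is_p[0] = False
--     is_p[1] = False
--     for p in range(2, limit + 1):
--         if is_p[p]:
--             for m in range(p * p, limit + 1, p):
--                 is_p[m] = False
--     return [i for i, b in enumerate(is_p) if b]
--
-- # weighted sum of an 8-digit string is at most 252, so one precomputed table answers premier
-- _PRIMES = _sieve(252)
--
-- def Chance(ch):
--     digits = [ord(c) - 48 for c in ch]
--     if len(digits) == 8 and all(0 <= d <= 9 for d in digits) and digits[0] in (2, 4, 5, 9):
--         s = sum(i * d for i, d in enumerate(digits))
--         return ("F\u00e9licitations, vous avez gagn\u00e9." if s in _PRIMES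
--                 else "D\u00e9sol\u00e9 vous n'avez pas gagn\u00e9.")
--     return "V\u00e9rifier le num\u00e9ro de t\u00e9lephone!"
-- ===== Notes on version B (the rewrite author's own statement) =====
-- stated objective: alternative
-- what changed: B replaces the per-call trial-division primality loop by a one-time sieve of Eratosthenes producing the table of primes up to 252 (the maximal weighted digit sum of an 8-digit string) and a membership test, and validates/sums via a decoded digit list (ord-48, all(), enumerate) instead of isdigit plus an index loop with a message accumulator.
import Mathlib
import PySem

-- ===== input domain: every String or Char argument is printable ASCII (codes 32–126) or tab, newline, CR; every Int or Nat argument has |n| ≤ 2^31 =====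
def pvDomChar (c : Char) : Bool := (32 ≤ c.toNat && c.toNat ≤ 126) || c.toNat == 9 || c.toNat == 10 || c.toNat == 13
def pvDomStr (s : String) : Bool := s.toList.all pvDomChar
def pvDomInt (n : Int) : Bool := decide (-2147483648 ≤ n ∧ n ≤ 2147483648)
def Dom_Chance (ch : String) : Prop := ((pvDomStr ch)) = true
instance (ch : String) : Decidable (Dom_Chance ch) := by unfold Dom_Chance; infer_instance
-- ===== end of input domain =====

-- B replaces the per-call trial-division premier by a one-time sieve of Eratosthenes (primes
-- up to 252, the maximal weighted digit sum) plus membership, validating via a decoded digit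
-- list; objective: alternative (same observed cost at these sizes).


set_option maxRecDepth 100000

-- ===== PORT A =====
-- 'while d<n and n%d!=0: d+=1' ported with fuel (n-2).toNat: d starts at 2 and the guard
-- d<n bounds the iterations, so the fuel is never exhausted while the guard still holds.
def premierLoop : Nat → Int → Int → Int
  | 0, _, d => d
  | f+1, n, d => if d < n ∧ n % d ≠ 0 then premierLoop f n (d+1) else d

def premier (n : Int) : Bool := n == premierLoop (n-2).toNat n 2

-- ch[0] is only evaluated after ch.isdigit() succeeded (Python 'and' short-circuits), so the
-- 'none' branch of the match is unreachable; likewise int(ch[i]) inside the else-branch always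
-- succeeds on a digit, so the '.getD 0' default is never used.
def Chance (ch : String) : String :=
  if !(PySem.Str.strIsdigit ch && PySem.Str.len ch == 8 &&
        (match PySem.Str.pyGet? ch 0 with
         | some c => ["2", "4", "5", "9"].contains (String.ofList [c])
         | none => false)) then
    "Vérifier le numéro de télephone!"
  else
    let s : Int := (PySem.List.pyRange 0 (PySem.Str.len ch) 1).foldl
      (fun s i => s + ((PySem.Str.pyGet? ch i).bind (fun c => PySem.Int.ofChars? [c])).getD 0 * i) 0
    if premier s then "Félicitations, vous avez gagné." else "Désolé vous n'avez pas gagné."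

-- ===== PORT B =====
-- literal port of _sieve: a Bool table updated in place (List.set = is_p[m]=False),
-- read back with enumerate + filter.
def pySieve (limit : Int) : List Int :=
  let isP := List.replicate (limit + 1).toNat true
  let isP := isP.set 0 false
  let isP := isP.set 1 false
  let isP := (PySem.List.pyRange 2 (limit + 1) 1).foldl
    (fun a p =>
      if a.getD p.toNat false then
        (PySem.List.pyRange (p * p) (limit + 1) p).foldl (fun a m => a.set m.toNat false) a
      else a) isP
  ((PySem.List.enumerate isP 0).filter (fun q => q.2)).map (fun q => q.1)

def pvPrimes : List Int := pySieve 252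

-- digits[0] is only evaluated after len(digits)==8 (Python 'and' short-circuits), so the
-- '.getD 0' default of pyGet? is never used.
def Chance_alt (ch : String) : String :=
  let digits : List Int := ch.toList.map (fun c => (c.toNat : Int) - 48)
  if digits.length == 8 && digits.all (fun d => decide (0 ≤ d) && decide (d ≤ 9)) &&
      [(2 : Int), 4, 5, 9].contains ((PySem.List.pyGet? digits 0).getD 0) then
    let s : Int := ((PySem.List.enumerate digits 0).map (fun p => p.1 * p.2)).sum
    if pvPrimes.contains s then "Félicitations, vous avez gagné."
    else "Désolé vous n'avez pas gagné."
  else "Vérifier le numéro de télephone!"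

-- ===== PRECONDITION & SPEC =====
def Spec_Chance (ch : String) (out : String) : Prop := out = Chance_alt ch
instance (ch : String) (out : String) : Decidable (Spec_Chance ch out) := by unfold Spec_Chance; infer_instance

-- ===== CLAIM =====
def Claim_equal_Chance : Prop := ∀ (ch : String), Dom_Chance ch → Spec_Chance ch (Chance ch)

-- ===== LEMMAS AND PROOFS =====

set_option maxHeartbeats 1000000 in
theorem pvPrimes_eq : pvPrimes =
    [2, 3, 5, 7, 11, 13, 17, 19, 23, 29, 31, 37, 41, 43, 47, 53, 59, 61, 67, 71, 73, 79, 83,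
     89, 97, 101, 103, 107, 109, 113, 127, 131, 137, 139, 149, 151, 157, 163, 167, 173, 179,
     181, 191, 193, 197, 199, 211, 223, 227, 229, 233, 239, 241, 251] := by
  decide

-- the weighted digit sum of an 8-digit string lies in [0,252]; there A's trial-division
-- premier agrees with membership in the sieve's prime table
set_option maxHeartbeats 1000000 in
theorem premier_eq_mem_nat : ∀ n : Nat, n < 253 →
    premier (n : Int) = pvPrimes.contains (n : Int) := by
  rw [pvPrimes_eq]; decide

theorem premier_eq_mem (n : Int) (h0 : 0 ≤ n) (h1 : n ≤ 252) :
    premier n = pvPrimes.contains n := by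
  have h := premier_eq_mem_nat n.toNat (by omega)
  rwa [Int.toNat_of_nonneg h0] at h

theorem digit_val (c : Char) (h : PySem.Chars.isdigit c = true) :
    PySem.Int.ofChars? [c] = some ((c.toNat : Int) - 48) := by
  simp [PySem.Chars.isdigit, Char.le_def] at h
  obtain ⟨h1, h2⟩ := h
  have hlo : 48 ≤ c.toNat := h1
  have hhi : c.toNat ≤ 57 := h2
  have hofn := Char.ofNat_toNat c
  interval_cases h : c.toNat <;> (rw [← hofn]; decide)

theorem digit_iff' (c : Char) :
    ((0 ≤ (c.toNat : Int) - 48) ∧ ((c.toNat : Int) - 48 ≤ 9)) ↔ PySem.Chars.isdigit c = true := by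
  simp [PySem.Chars.isdigit, Char.le_def]
  rw [UInt32.le_iff_toNat_le, UInt32.le_iff_toNat_le]
  have h3 : c.val.toNat = c.toNat := rfl
  have h1 : (48 : UInt32).toNat = 48 := rfl
  have h2 : (57 : UInt32).toNat = 57 := rfl
  rw [h3, h1, h2]

theorem isdigit_of_bounds (c : Char) (h48 : 48 ≤ c.toNat) (h57 : c.toNat ≤ 57) :
    PySem.Chars.isdigit c = true :=
  (digit_iff' c).mp ⟨by omega, by omega⟩

theorem guard_eq (c : Char) (h : PySem.Chars.isdigit c = true) :
    (["2", "4", "5", "9"].contains (String.ofList [c]))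
      = [(2 : Int), 4, 5, 9].contains ((c.toNat : Int) - 48) := by
  simp [PySem.Chars.isdigit, Char.le_def] at h
  obtain ⟨h1, h2⟩ := h
  have hlo : 48 ≤ c.toNat := h1
  have hhi : c.toNat ≤ 57 := h2
  have hofn := Char.ofNat_toNat c
  interval_cases h : c.toNat <;> (rw [← hofn]; decide)

theorem finish (n m : Int) (h : n = m) (h0 : 0 ≤ n) (h1 : n ≤ 252) :
    (if premier n then "Félicitations, vous avez gagné." else "Désolé vous n'avez pas gagné.")
  = (if m ∈ pvPrimes then "Félicitations, vous avez gagné."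
     else "Désolé vous n'avez pas gagné.") := by
  subst h
  rw [premier_eq_mem n h0 h1]
  by_cases hmem : n ∈ pvPrimes <;> simp [hmem]

-- ===== VERDICT =====
set_option maxHeartbeats 4000000 in
theorem Chance_spec : Claim_equal_Chance := by
  intro ch _
  unfold Spec_Chance
  by_cases hl : ch.toList.length = 8
  · rcases htl : ch.toList with _ | ⟨c0, _ | ⟨c1, _ | ⟨c2, _ | ⟨c3, _ | ⟨c4, _ | ⟨c5, _ | ⟨c6, _ | ⟨c7, _ | ⟨c8, t⟩⟩⟩⟩⟩⟩⟩⟩⟩ <;>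
      rw [htl] at hl <;> simp at hl
    by_cases hd : (PySem.Chars.isdigit c0 && PySem.Chars.isdigit c1 && PySem.Chars.isdigit c2 &&
        PySem.Chars.isdigit c3 && PySem.Chars.isdigit c4 && PySem.Chars.isdigit c5 &&
        PySem.Chars.isdigit c6 && PySem.Chars.isdigit c7) = true
    · simp only [Bool.and_eq_true] at hd
      obtain ⟨⟨⟨⟨⟨⟨⟨h0, h1⟩, h2⟩, h3⟩, h4⟩, h5⟩, h6⟩, h7⟩ := hd
      have hdig : PySem.Chars.strIsdigit [c0, c1, c2, c3, c4, c5, c6, c7] = true := by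
        simp [PySem.Chars.strIsdigit, h0, h1, h2, h3, h4, h5, h6, h7]
      have b0 : 48 ≤ c0.toNat ∧ c0.toNat ≤ 57 := by
        simpa [PySem.Chars.isdigit, Char.le_def] using h0
      have b1 : 48 ≤ c1.toNat ∧ c1.toNat ≤ 57 := by
        simpa [PySem.Chars.isdigit, Char.le_def] using h1
      have b2 : 48 ≤ c2.toNat ∧ c2.toNat ≤ 57 := by
        simpa [PySem.Chars.isdigit, Char.le_def] using h2
      have b3 : 48 ≤ c3.toNat ∧ c3.toNat ≤ 57 := by
        simpa [PySem.Chars.isdigit, Char.le_def] using h3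
      have b4 : 48 ≤ c4.toNat ∧ c4.toNat ≤ 57 := by
        simpa [PySem.Chars.isdigit, Char.le_def] using h4
      have b5 : 48 ≤ c5.toNat ∧ c5.toNat ≤ 57 := by
        simpa [PySem.Chars.isdigit, Char.le_def] using h5
      have b6 : 48 ≤ c6.toNat ∧ c6.toNat ≤ 57 := by
        simpa [PySem.Chars.isdigit, Char.le_def] using h6
      have b7 : 48 ≤ c7.toNat ∧ c7.toNat ≤ 57 := by
        simpa [PySem.Chars.isdigit, Char.le_def] using h7
      by_cases hm : (["2", "4", "5", "9"].contains (String.ofList [c0])) = true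
      · have hB : [(2 : Int), 4, 5, 9].contains ((c0.toNat : Int) - 48) = true := by
          rw [← guard_eq c0 h0]; exact hm
        simp at hm hB
        simp [Chance, Chance_alt, PySem.Str.strIsdigit_eq, PySem.Str.len_eq, htl, hdig, hm, hB,
          b0.1, b0.2, b1.1, b1.2, b2.1, b2.2, b3.1, b3.2, b4.1, b4.2, b5.1, b5.2,
          b6.1, b6.2, b7.1, b7.2,
          PySem.List.pyRange_one, List.range_succ,
          digit_val _ h0, digit_val _ h1, digit_val _ h2, digit_val _ h3,
          digit_val _ h4, digit_val _ h5, digit_val _ h6, digit_val _ h7,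
          PySem.List.enumerate_cons, PySem.List.enumerate_nil]
        apply finish
        · ring
        · omega
        · omega
      · rw [Bool.not_eq_true] at hm
        have hB : [(2 : Int), 4, 5, 9].contains ((c0.toNat : Int) - 48) = false := by
          rw [← guard_eq c0 h0]; exact hm
        simp at hm hB
        simp [Chance, Chance_alt, PySem.Str.strIsdigit_eq, PySem.Str.len_eq, htl, hdig, hm, hB,
          b0.1, b0.2, b1.1, b1.2, b2.1, b2.2, b3.1, b3.2, b4.1, b4.2, b5.1, b5.2,
          b6.1, b6.2, b7.1, b7.2]
    · -- some character is not a digit: both guards fail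
      have hA : PySem.Chars.strIsdigit [c0, c1, c2, c3, c4, c5, c6, c7] = false := by
        rw [Bool.not_eq_true] at hd
        simp [PySem.Chars.strIsdigit, List.all_cons]
        simp at hd
        tauto
      simp [Chance, Chance_alt, PySem.Str.strIsdigit_eq, PySem.Str.len_eq, htl, hA]
      rw [Bool.not_eq_true] at hd
      simp at hd
      intro p0 p1 p2 p3 p4 p5 p6 p7 p8 p9 p10 p11 p12 p13 p14 p15 _
      have q0 := isdigit_of_bounds c0 p0 p1
      have q1 := isdigit_of_bounds c1 p2 p3
      have q2 := isdigit_of_bounds c2 p4 p5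
      have q3 := isdigit_of_bounds c3 p6 p7
      have q4 := isdigit_of_bounds c4 p8 p9
      have q5 := isdigit_of_bounds c5 p10 p11
      have q6 := isdigit_of_bounds c6 p12 p13
      have q7 := isdigit_of_bounds c7 p14 p15
      exact absurd q7 (by simp [hd q0 q1 q2 q3 q4 q5 q6])
  · have hl8 : ¬((ch.length : Int) = 8) := by
      rw [← String.length_toList]; omega
    simp [Chance, Chance_alt, PySem.Str.len_eq, hl8]
    intro h
    exact absurd (by rw [String.length_toList]; exact h) hl
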